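-- pv_equiv track=rewrite | github.com/krutikray/formi-exercise | src/api/endpoints.py | _classify_lane
-- ===== SOURCE A (Python) =====
-- _HOT_KEYWORDS = frozenset({
--     "confirmed", "confirm", "rebook", "booked", "book", "demo",
--     "escalat", "manager", "complaint", "angry", "urgent",
--     "appointment", "appoint", "schedule", "tomorrow",
-- })
--
-- def _classify_lane(transcript: list) -> str:
--     """
--     Classify transcript into one of three processing lanes.
--
--     Returns:
--         "skip": <4 turns — wrong number, immediate hangup. No LLM needed.
--         "hot":  High-value outcome detected (confirmed booking, escalation).
--         "cold": Default — deferred processing under rate-limit pressure.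
--
--     Algorithm: case-insensitive keyword scan of all customer turns.
--     Hot keywords take priority — if any hot keyword is found, lane = hot
--     regardless of cold keywords present. This avoids misclassifying a
--     call where the customer says "not interested in waiting, book me now."
--     """
--     if len(transcript) < 4:
--         return "skip"
--
--     # Scan all turns for hot keywords: agent-side keywords ("demo booked", "appointment",
--     # "escalat") are reliable positive signals regardless of which party speaks them.
--     # We already limit the hot set to words that genuinely signal urgent outcomes.
--     all_text = " ".join(turn.get("content", "").lower() for turn in transcript)
--
--     for kw in _HOT_KEYWORDS:
--         if kw in all_text:
--             return "hot"
--
--     return "cold"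
-- ===== SOURCE B (Python) =====
-- _HOT_KEYWORDS = frozenset({
--     "confirmed", "confirm", "rebook", "booked", "book", "demo",
--     "escalat", "manager", "complaint", "angry", "urgent",
--     "appointment", "appoint", "schedule", "tomorrow",
-- })
--
--
-- def _scan(transcript):
--     # Hand-rolled multi-pattern search: for each turn, slide over every
--     # character position and test whether some hot keyword starts there.
--     # No joined string is ever built and the scan exits at the first hit.
--     for turn in transcript:
--         text = turn.get("content", "").lower()
--         for i in range(len(text)):
--             for kw in _HOT_KEYWORDS:
--                 if text.startswith(kw, i):
--                     return True
--     return False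
--
--
-- def _classify_lane(transcript: list) -> str:
--     if len(transcript) < 4:
--         return "skip"
--     return "hot" if _scan(transcript) else "cold"
-- ===== Notes on version B (the rewrite author's own statement) =====
-- stated objective: alternative
-- what changed: B never builds the space-joined transcript and does no substring 'in' tests: it slides position by position over each turn's lowered text, testing at every offset whether some hot keyword starts there (a hand-rolled multi-pattern prefix search with early exit); equal because no keyword contains the join separator.
import Mathlib
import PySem

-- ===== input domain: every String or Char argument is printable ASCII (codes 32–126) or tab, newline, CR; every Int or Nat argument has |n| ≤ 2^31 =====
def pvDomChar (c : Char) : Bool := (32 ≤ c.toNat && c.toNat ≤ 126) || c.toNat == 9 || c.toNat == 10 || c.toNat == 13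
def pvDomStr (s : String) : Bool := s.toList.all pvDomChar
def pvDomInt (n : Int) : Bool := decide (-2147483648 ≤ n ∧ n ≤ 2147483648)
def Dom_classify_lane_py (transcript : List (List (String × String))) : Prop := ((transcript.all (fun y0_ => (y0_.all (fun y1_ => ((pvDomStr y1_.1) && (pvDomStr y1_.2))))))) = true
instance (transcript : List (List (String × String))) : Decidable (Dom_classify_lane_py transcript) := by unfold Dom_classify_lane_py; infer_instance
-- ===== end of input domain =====

-- B replaces A's "join all turns, then one substring scan per keyword" with a hand-rolled
-- multi-pattern search: slide over every position of each turn's lowered text and test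
-- whether a keyword starts there; equal because no keyword contains the join separator.
-- Objective: alternative decomposition (not claimed faster).

-- ===== PORT A =====
-- _HOT_KEYWORDS (a frozenset; its iteration order is arbitrary, but A's result does not
-- depend on it — A returns "hot" iff ANY keyword matches — so a fixed-order list is exact)
def hotKeywordsA : List String :=
  ["confirmed", "confirm", "rebook", "booked", "book", "demo",
   "escalat", "manager", "complaint", "angry", "urgent",
   "appointment", "appoint", "schedule", "tomorrow"]

def classify_lane_py (transcript : List (List (String × String))) : String :=
  if transcript.length < 4 then "skip"
  else
    -- all_text = " ".join(turn.get("content", "").lower() for turn in transcript)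
    let all_text := PySem.Str.join " "
      (transcript.map (fun turn => PySem.Str.lower (PySem.Dict.getD ⟨turn⟩ "content" "")))
    -- for kw in _HOT_KEYWORDS: if kw in all_text: return "hot"   /   return "cold"
    if hotKeywordsA.any (fun kw => PySem.Str.isIn kw all_text) then "hot" else "cold"

-- ===== PORT B =====
-- Source B's _HOT_KEYWORDS is the identical frozenset, as char lists for the prefix tests.
def hotKeywordsB : List (List Char) := hotKeywordsA.map String.toList

-- inner two loops of _scan: for i in range(len(text)): for kw: if text.startswith(kw, i)
def scanText : List Char → Bool
  | [] => false
  | c :: rest =>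
      if hotKeywordsB.any (fun kw => kw.isPrefixOf (c :: rest)) then true
      else scanText rest

-- outer loop of _scan over the turns, with early exit
def scanTranscript : List (List (String × String)) → Bool
  | [] => false
  | turn :: rest =>
      if scanText (PySem.Str.lower (PySem.Dict.getD ⟨turn⟩ "content" "")).toList then true
      else scanTranscript rest

def classify_lane_py_alt (transcript : List (List (String × String))) : String :=
  if transcript.length < 4 then "skip"
  else if scanTranscript transcript then "hot" else "cold"

-- ===== PRECONDITION & SPEC =====
def Spec_classify_lane_py (transcript : List (List (String × String))) (out : String) : Prop := out = classify_lane_py_alt transcript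
instance (transcript : List (List (String × String))) (out : String) : Decidable (Spec_classify_lane_py transcript out) := by unfold Spec_classify_lane_py; infer_instance

-- ===== CLAIM (what is proved, stated in full; the proofs are below) =====
def Claim_equal_classify_lane_py : Prop := ∀ (transcript : List (List (String × String))), Dom_classify_lane_py transcript → Spec_classify_lane_py transcript (classify_lane_py transcript)

-- ===== LEMMAS AND PROOFS =====

-- A word that avoids a character c is an infix of `a ++ c :: b` iff it is an infix of a or of b.
theorem infix_split {kw a b : List Char} {c : Char} (hc : c ∉ kw) :
    kw <:+: (a ++ c :: b) ↔ kw <:+: a ∨ kw <:+: b := by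
  constructor
  · rintro ⟨s, t, h⟩
    rcases Nat.lt_or_ge a.length (s.length + kw.length) with hn | hn
    · rcases Nat.lt_or_ge a.length s.length with hi | hi
      · -- occurrence lies inside b
        refine Or.inr ?_
        have hd := congrArg (List.drop (a.length + 1)) h
        have hab : a ++ c :: b = (a ++ [c]) ++ b := by simp
        rw [List.append_assoc, List.drop_append_of_le_length (by omega), hab] at hd
        rw [show a.length + 1 = (a ++ [c]).length by simp, List.drop_left] at hd
        exact ⟨s.drop (a.length + 1), t, by simpa [List.append_assoc] using hd⟩
      · -- c would fall inside kw: contradiction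
        exfalso
        have hget := congrArg (fun l => l[a.length]?) h
        simp only at hget
        rw [List.getElem?_append_right (l₁ := a) (le_refl _)] at hget
        rw [List.getElem?_append_left (by simp; omega)] at hget
        rw [List.getElem?_append_right (l₁ := s) hi] at hget
        simp at hget
        exact hc (List.mem_of_getElem? hget)
    · -- occurrence lies inside a
      refine Or.inl ?_
      have hs : s = a.take s.length := by
        have h2 := congrArg (List.take s.length) h
        rw [List.append_assoc, List.take_left, List.take_append_of_le_length (by omega)] at h2
        exact h2
      have hd := congrArg (List.drop s.length) h
      rw [List.append_assoc, List.drop_left, List.drop_append_of_le_length (by omega)] at hd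
      have hkw : kw = (a.drop s.length).take kw.length := by
        have h3 := congrArg (List.take kw.length) hd
        rw [List.take_left, List.take_append_of_le_length (by simp; omega)] at h3
        exact h3
      have hpre : kw <+: a.drop s.length := hkw ▸ List.take_prefix _ _
      exact hpre.isInfix.trans (List.drop_suffix _ _).isInfix
  · rintro (⟨s, t, rfl⟩ | ⟨s, t, rfl⟩)
    · exact ⟨s, t ++ c :: b, by simp⟩
    · exact ⟨a ++ c :: s, t, by simp [List.append_assoc]⟩

-- A space-free nonempty word is an infix of the " "-join iff it is an infix of some part.
theorem infix_join {kw : List Char} (hne : kw ≠ []) (hc : ' ' ∉ kw) :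
    ∀ parts : List (List Char),
      (kw <:+: PySem.Chars.join [' '] parts ↔ ∃ t ∈ parts, kw <:+: t) := by
  intro parts
  induction parts with
  | nil => simp [PySem.Chars.join_nil, List.infix_nil, hne]
  | cons p rest ih =>
    cases rest with
    | nil => simp [PySem.Chars.join_singleton]
    | cons q rest' =>
      rw [PySem.Chars.join_cons_cons, List.append_assoc]
      simp [infix_split hc, ih]

theorem hot_ok : ∀ kw ∈ hotKeywordsA, kw.toList ≠ [] ∧ ' ' ∉ kw.toList := by decide

-- B's position-by-position prefix test finds exactly the keywords occurring as infixes.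
theorem scanText_iff (cs : List Char) :
    scanText cs = true ↔ ∃ kw ∈ hotKeywordsB, kw <:+: cs := by
  induction cs with
  | nil =>
    simp only [scanText, Bool.false_eq_true, false_iff]
    rintro ⟨kw, hkw, hinf⟩
    have : kw ≠ [] := by
      obtain ⟨s, hs, rfl⟩ := List.mem_map.mp hkw
      exact (hot_ok s hs).1
    simp [List.infix_nil] at hinf
    exact this hinf
  | cons c rest ih =>
    simp only [scanText]
    split_ifs with h
    · simp only [true_iff]
      obtain ⟨kw, hkw, hpre⟩ := List.any_eq_true.mp h
      exact ⟨kw, hkw, (List.isPrefixOf_iff_prefix.mp hpre).isInfix⟩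
    · rw [ih]
      constructor
      · rintro ⟨kw, hkw, hinf⟩
        exact ⟨kw, hkw, hinf.trans (List.suffix_cons c rest).isInfix⟩
      · rintro ⟨kw, hkw, hinf⟩
        rcases List.infix_cons_iff.mp hinf with hp | hi
        · exact absurd (List.any_eq_true.mpr ⟨kw, hkw, show kw.isPrefixOf (c :: rest) = true from List.isPrefixOf_iff_prefix.mpr hp⟩) h
        · exact ⟨kw, hkw, hi⟩

theorem scanTranscript_iff (ts : List (List (String × String))) :
    scanTranscript ts = true ↔
      ∃ turn ∈ ts, ∃ kw ∈ hotKeywordsB,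
        kw <:+: (PySem.Str.lower (PySem.Dict.getD ⟨turn⟩ "content" "")).toList := by
  induction ts with
  | nil => simp [scanTranscript]
  | cons turn rest ih =>
    simp only [scanTranscript]
    split_ifs with h
    · simp only [true_iff]
      obtain ⟨kw, hkw, hinf⟩ := (scanText_iff _).mp h
      exact ⟨turn, by simp, kw, hkw, hinf⟩
    · rw [ih]
      constructor
      · rintro ⟨t, ht, hx⟩; exact ⟨t, by simp [ht], hx⟩
      · rintro ⟨t, ht, hx⟩
        rcases List.mem_cons.mp ht with rfl | ht'
        · exact absurd ((scanText_iff _).mpr hx) h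
        · exact ⟨t, ht', hx⟩

theorem classify_lane_py_spec : Claim_equal_classify_lane_py := by
  unfold Claim_equal_classify_lane_py
  intro transcript _
  unfold Spec_classify_lane_py classify_lane_py classify_lane_py_alt
  by_cases hlen : transcript.length < 4
  · simp [hlen]
  · simp only [if_neg hlen]
    have hcond : ∀ (c1 c2 : Bool), (c1 = true ↔ c2 = true) →
        (if c1 then ("hot":String) else "cold") = (if c2 then "hot" else "cold") := by
      intro c1 c2 h; rw [Bool.eq_iff_iff.mpr h]
    apply hcond
    rw [scanTranscript_iff]
    simp only [List.any_eq_true]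
    constructor
    · rintro ⟨kw, hkw, hin⟩
      rw [PySem.Str.isIn_iff_infix, PySem.Str.toList_join] at hin
      have hsep : (" " : String).toList = [' '] := by decide
      rw [hsep, List.map_map] at hin
      obtain ⟨hne, hsp⟩ := hot_ok kw hkw
      obtain ⟨t, ht, hinf⟩ := (infix_join hne hsp _).mp hin
      obtain ⟨turn, hturn, rfl⟩ := List.mem_map.mp ht
      exact ⟨turn, hturn, kw.toList, List.mem_map.mpr ⟨kw, hkw, rfl⟩, hinf⟩
    · rintro ⟨turn, hturn, kwc, hkwc, hin⟩
      obtain ⟨kw, hkw, rfl⟩ := List.mem_map.mp hkwc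
      obtain ⟨hne, hsp⟩ := hot_ok kw hkw
      refine ⟨kw, hkw, ?_⟩
      rw [PySem.Str.isIn_iff_infix, PySem.Str.toList_join]
      have hsep : (" " : String).toList = [' '] := by decide
      rw [hsep, List.map_map]
      exact (infix_join hne hsp _).mpr
        ⟨_, List.mem_map.mpr ⟨turn, hturn, rfl⟩, hin⟩
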